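-- pv_equiv track=rewrite | github.com/CodeAlexx/Eri-Rpg | erirpg/verification/key_links.py | detect_link_type
-- ===== SOURCE A (Python) =====
-- from typing import Dict, List, Optional, Tuple
--
-- def detect_link_type(via: str) -> Optional[str]:
--     """Detect the type of link from the 'via' description.
--
--     Args:
--         via: Description of how components connect
--
--     Returns:
--         Link type key or None if not detected
--     """
--     via_lower = via.lower()
--
--     if any(w in via_lower for w in ["api", "endpoint", "http", "rest"]):
--         return "component_api"
--     if any(w in via_lower for w in ["database", "db", "sql", "query", "model"]):
--         return "api_database"
--     if any(w in via_lower for w in ["form", "submit", "handler"]):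
--         return "form_handler"
--     if any(w in via_lower for w in ["state", "render", "update"]):
--         return "state_render"
--     if any(w in via_lower for w in ["event", "emit", "listen", "subscribe"]):
--         return "event_listener"
--     if any(w in via_lower for w in ["route", "navigation", "path"]):
--         return "route_component"
--     if any(w in via_lower for w in ["import", "export", "require", "module"]):
--         return "import_export"
--
--     return None
-- ===== SOURCE B (Python) =====
-- from typing import Optional
--
-- # Flat keyword -> (priority, label) table; the answer is the label of the
-- # minimum-priority keyword that occurs in the string (min over matches,
-- # instead of A's ordered short-circuit over grouped branches).
-- _PRIORITY = [
--     ("api", 0, "component_api"), ("endpoint", 0, "component_api"),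
--     ("http", 0, "component_api"), ("rest", 0, "component_api"),
--     ("database", 1, "api_database"), ("db", 1, "api_database"),
--     ("sql", 1, "api_database"), ("query", 1, "api_database"),
--     ("model", 1, "api_database"),
--     ("form", 2, "form_handler"), ("submit", 2, "form_handler"),
--     ("handler", 2, "form_handler"),
--     ("state", 3, "state_render"), ("render", 3, "state_render"),
--     ("update", 3, "state_render"),
--     ("event", 4, "event_listener"), ("emit", 4, "event_listener"),
--     ("listen", 4, "event_listener"), ("subscribe", 4, "event_listener"),
--     ("route", 5, "route_component"), ("navigation", 5, "route_component"),
--     ("path", 5, "route_component"),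
--     ("import", 6, "import_export"), ("export", 6, "import_export"),
--     ("require", 6, "import_export"), ("module", 6, "import_export"),
-- ]
--
-- def detect_link_type(via: str) -> Optional[str]:
--     via_lower = via.lower()
--     best = None
--     for keyword, priority, label in _PRIORITY:
--         if keyword in via_lower and (best is None or priority < best[0]):
--             best = (priority, label)
--     return None if best is None else best[1]
-- ===== Notes on version B (the rewrite author's own statement) =====
-- stated objective: alternative
-- what changed: Replaces the seven unrolled grouped-any branches with a single pass over a flat keyword->(priority,label) table that keeps the minimum-priority matched keyword and returns its label at the end (min-accumulator instead of ordered short-circuit).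
import Mathlib
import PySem

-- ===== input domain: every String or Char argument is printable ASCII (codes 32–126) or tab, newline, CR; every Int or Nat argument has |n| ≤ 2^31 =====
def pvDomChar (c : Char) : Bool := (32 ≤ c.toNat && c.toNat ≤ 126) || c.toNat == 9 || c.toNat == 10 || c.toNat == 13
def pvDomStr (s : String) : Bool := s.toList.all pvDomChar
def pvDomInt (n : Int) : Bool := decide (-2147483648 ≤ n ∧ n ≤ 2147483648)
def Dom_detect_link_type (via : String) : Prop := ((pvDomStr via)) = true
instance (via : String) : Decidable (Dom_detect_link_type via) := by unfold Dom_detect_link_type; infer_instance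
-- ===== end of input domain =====

-- B replaces A's seven unrolled grouped branches with a single min-accumulator pass over a flat keyword->(priority,label) table (alternative; same cost).

-- ===== PORT A =====
def detect_link_type (via : String) : Option String :=
  let via_lower := PySem.Str.lower via
  if ["api", "endpoint", "http", "rest"].any (fun w => PySem.Str.isIn w via_lower) then
    some "component_api"
  else if ["database", "db", "sql", "query", "model"].any (fun w => PySem.Str.isIn w via_lower) then
    some "api_database"
  else if ["form", "submit", "handler"].any (fun w => PySem.Str.isIn w via_lower) then
    some "form_handler"
  else if ["state", "render", "update"].any (fun w => PySem.Str.isIn w via_lower) then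
    some "state_render"
  else if ["event", "emit", "listen", "subscribe"].any (fun w => PySem.Str.isIn w via_lower) then
    some "event_listener"
  else if ["route", "navigation", "path"].any (fun w => PySem.Str.isIn w via_lower) then
    some "route_component"
  else if ["import", "export", "require", "module"].any (fun w => PySem.Str.isIn w via_lower) then
    some "import_export"
  else
    none

-- ===== PORT B =====
def linkKeywordPriority : List (String × Int × String) :=
  [ ("api", 0, "component_api"),
    ("endpoint", 0, "component_api"),
    ("http", 0, "component_api"),
    ("rest", 0, "component_api"),
    ("database", 1, "api_database"),
    ("db", 1, "api_database"),
    ("sql", 1, "api_database"),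
    ("query", 1, "api_database"),
    ("model", 1, "api_database"),
    ("form", 2, "form_handler"),
    ("submit", 2, "form_handler"),
    ("handler", 2, "form_handler"),
    ("state", 3, "state_render"),
    ("render", 3, "state_render"),
    ("update", 3, "state_render"),
    ("event", 4, "event_listener"),
    ("emit", 4, "event_listener"),
    ("listen", 4, "event_listener"),
    ("subscribe", 4, "event_listener"),
    ("route", 5, "route_component"),
    ("navigation", 5, "route_component"),
    ("path", 5, "route_component"),
    ("import", 6, "import_export"),
    ("export", 6, "import_export"),
    ("require", 6, "import_export"),
    ("module", 6, "import_export") ]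

def detect_link_type_alt (via : String) : Option String :=
  let via_lower := PySem.Str.lower via
  let best := linkKeywordPriority.foldl
    (fun (best : Option (Int × String)) e =>
      if PySem.Str.isIn e.1 via_lower &&
          (match best with
           | none => true
           | some b => decide (e.2.1 < b.1)) then
        some (e.2.1, e.2.2)
      else best)
    none
  match best with
  | none => none
  | some b => some b.2

-- ===== PRECONDITION & SPEC =====
def Spec_detect_link_type (via : String) (out : Option String) : Prop := out = detect_link_type_alt via
instance (via : String) (out : Option String) : Decidable (Spec_detect_link_type via out) := by unfold Spec_detect_link_type; infer_instance

-- ===== CLAIM (what is proved, stated in full; the proofs are below) =====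
def Claim_equal_detect_link_type : Prop := ∀ (via : String), Dom_detect_link_type via → Spec_detect_link_type via (detect_link_type via)

-- ===== LEMMAS AND PROOFS =====

-- ===== VERDICT (by name: the statement is the Claim_ definition above) =====
set_option maxHeartbeats 2000000 in
theorem detect_link_type_spec : Claim_equal_detect_link_type := by
  intro via _
  unfold Spec_detect_link_type detect_link_type detect_link_type_alt linkKeywordPriority
  by_cases h1 : PySem.Chars.isIn ['a', 'p', 'i'] (PySem.Chars.lower via.toList) = true
  · simp [*]
  ·
    by_cases h2 : PySem.Chars.isIn ['e', 'n', 'd', 'p', 'o', 'i', 'n', 't'] (PySem.Chars.lower via.toList) = true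
    · simp [*]
    ·
      by_cases h3 : PySem.Chars.isIn ['h', 't', 't', 'p'] (PySem.Chars.lower via.toList) = true
      · simp [*]
      ·
        by_cases h4 : PySem.Chars.isIn ['r', 'e', 's', 't'] (PySem.Chars.lower via.toList) = true
        · simp [*]
        ·
          by_cases h5 : PySem.Chars.isIn ['d', 'a', 't', 'a', 'b', 'a', 's', 'e'] (PySem.Chars.lower via.toList) = true
          · simp [*]
          ·
            by_cases h6 : PySem.Chars.isIn ['d', 'b'] (PySem.Chars.lower via.toList) = true
            · simp [*]
            ·
              by_cases h7 : PySem.Chars.isIn ['s', 'q', 'l'] (PySem.Chars.lower via.toList) = true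
              · simp [*]
              ·
                by_cases h8 : PySem.Chars.isIn ['q', 'u', 'e', 'r', 'y'] (PySem.Chars.lower via.toList) = true
                · simp [*]
                ·
                  by_cases h9 : PySem.Chars.isIn ['m', 'o', 'd', 'e', 'l'] (PySem.Chars.lower via.toList) = true
                  · simp [*]
                  ·
                    by_cases h10 : PySem.Chars.isIn ['f', 'o', 'r', 'm'] (PySem.Chars.lower via.toList) = true
                    · simp [*]
                    ·
                      by_cases h11 : PySem.Chars.isIn ['s', 'u', 'b', 'm', 'i', 't'] (PySem.Chars.lower via.toList) = true
                      · simp [*]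
                      ·
                        by_cases h12 : PySem.Chars.isIn ['h', 'a', 'n', 'd', 'l', 'e', 'r'] (PySem.Chars.lower via.toList) = true
                        · simp [*]
                        ·
                          by_cases h13 : PySem.Chars.isIn ['s', 't', 'a', 't', 'e'] (PySem.Chars.lower via.toList) = true
                          · simp [*]
                          ·
                            by_cases h14 : PySem.Chars.isIn ['r', 'e', 'n', 'd', 'e', 'r'] (PySem.Chars.lower via.toList) = true
                            · simp [*]
                            ·
                              by_cases h15 : PySem.Chars.isIn ['u', 'p', 'd', 'a', 't', 'e'] (PySem.Chars.lower via.toList) = true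
                              · simp [*]
                              ·
                                by_cases h16 : PySem.Chars.isIn ['e', 'v', 'e', 'n', 't'] (PySem.Chars.lower via.toList) = true
                                · simp [*]
                                ·
                                  by_cases h17 : PySem.Chars.isIn ['e', 'm', 'i', 't'] (PySem.Chars.lower via.toList) = true
                                  · simp [*]
                                  ·
                                    by_cases h18 : PySem.Chars.isIn ['l', 'i', 's', 't', 'e', 'n'] (PySem.Chars.lower via.toList) = true
                                    · simp [*]
                                    ·
                                      by_cases h19 : PySem.Chars.isIn ['s', 'u', 'b', 's', 'c', 'r', 'i', 'b', 'e'] (PySem.Chars.lower via.toList) = true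
                                      · simp [*]
                                      ·
                                        by_cases h20 : PySem.Chars.isIn ['r', 'o', 'u', 't', 'e'] (PySem.Chars.lower via.toList) = true
                                        · simp [*]
                                        ·
                                          by_cases h21 : PySem.Chars.isIn ['n', 'a', 'v', 'i', 'g', 'a', 't', 'i', 'o', 'n'] (PySem.Chars.lower via.toList) = true
                                          · simp [*]
                                          ·
                                            by_cases h22 : PySem.Chars.isIn ['p', 'a', 't', 'h'] (PySem.Chars.lower via.toList) = true
                                            · simp [*]
                                            ·
                                              by_cases h23 : PySem.Chars.isIn ['i', 'm', 'p', 'o', 'r', 't'] (PySem.Chars.lower via.toList) = true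
                                              · simp [*]
                                              ·
                                                by_cases h24 : PySem.Chars.isIn ['e', 'x', 'p', 'o', 'r', 't'] (PySem.Chars.lower via.toList) = true
                                                · simp [*]
                                                ·
                                                  by_cases h25 : PySem.Chars.isIn ['r', 'e', 'q', 'u', 'i', 'r', 'e'] (PySem.Chars.lower via.toList) = true
                                                  · simp [*]
                                                  ·
                                                    by_cases h26 : PySem.Chars.isIn ['m', 'o', 'd', 'u', 'l', 'e'] (PySem.Chars.lower via.toList) = true
                                                    · simp [*]
                                                    · simp [*]
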